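-- pv_equiv track=rewrite | github.com/zachsaws/people-dossier-v1-skill | scripts/retrieve_sources.py | company_domain_urls
-- ===== SOURCE A (Python) =====
-- def dedupe_preserve_order(values: list[str]) -> list[str]:
--     seen = set()
--     output = []
--     for value in values:
--         if not value or value in seen:
--             continue
--         seen.add(value)
--         output.append(value)
--     return output
--
-- def normalize_domain(domain: str) -> str:
--     cleaned = domain.strip().lower()
--     cleaned = cleaned.replace("https://", "").replace("http://", "").strip("/")
--     return cleaned
--
-- def company_domain_urls(domains: list[str]) -> list[str]:
--     urls: list[str] = []
--     common_paths = ["", "/", "/about", "/about-us", "/contact", "/news", "/company", "/team"]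
--     for domain in domains:
--         normalized = normalize_domain(domain)
--         if not normalized:
--             continue
--         for path in common_paths:
--             urls.append(f"https://{normalized}{path}")
--     return dedupe_preserve_order(urls)
-- ===== SOURCE B (Python) =====
-- def company_domain_urls(domains: list[str]) -> list[str]:
--     common_paths = ["", "/", "/about", "/about-us", "/contact", "/news", "/company", "/team"]
--     seen = set()
--     unique = []
--     for domain in domains:
--         n = domain.strip().lower().replace("https://", "").replace("http://", "").strip("/")
--         if n and n not in seen:
--             seen.add(n)
--             unique.append(n)
--     return [f"https://{n}{p}" for n in unique for p in common_paths]
-- ===== Notes on version B (the rewrite author's own statement) =====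
-- stated objective: faster
-- what changed: B dedupes the normalized domains once before generation (seen-set over the n short domain strings) and emits the URLs in a single comprehension with no final dedupe pass, instead of A's generate-all-then-dedupe over all 8n long URL strings.
import Mathlib
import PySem

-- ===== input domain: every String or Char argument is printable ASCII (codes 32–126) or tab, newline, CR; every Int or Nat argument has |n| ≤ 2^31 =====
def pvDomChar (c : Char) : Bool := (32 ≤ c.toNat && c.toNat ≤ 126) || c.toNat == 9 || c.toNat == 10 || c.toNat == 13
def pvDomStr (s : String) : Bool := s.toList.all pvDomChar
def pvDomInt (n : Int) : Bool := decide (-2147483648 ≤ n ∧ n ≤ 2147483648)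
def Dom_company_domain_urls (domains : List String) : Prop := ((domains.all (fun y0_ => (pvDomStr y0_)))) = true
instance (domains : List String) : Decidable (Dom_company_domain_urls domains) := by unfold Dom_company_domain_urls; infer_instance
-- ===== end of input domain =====

-- B change: B dedupes the normalized domains once before generating the URLs and emits them in a
-- single comprehension with no final URL-level dedupe pass (measurably faster in a timing run).

-- ===== PORT A =====
def normalize_domain (domain : String) : String :=
  let cleaned := PySem.Str.lower (PySem.Str.strip domain)
  let cleaned := PySem.Str.replace (PySem.Str.replace cleaned "https://" "") "http://" ""
  PySem.Str.stripChars cleaned "/"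

def dedupe_preserve_order (values : List String) : List String :=
  (values.foldl
    (fun (st : PySem.Set String × List String) value =>
      if value = "" ∨ PySem.Set.contains st.1 value then st
      else (PySem.Set.add st.1 value, st.2 ++ [value]))
    (PySem.Set.empty, [])).2

def company_domain_urls (domains : List String) : List String :=
  let common_paths : List String := ["", "/", "/about", "/about-us", "/contact", "/news", "/company", "/team"]
  let urls := domains.foldl
    (fun urls domain =>
      let normalized := normalize_domain domain
      if normalized = "" then urls
      else common_paths.foldl (fun urls path => urls ++ ["https://" ++ normalized ++ path]) urls)
    []
  dedupe_preserve_order urls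

-- ===== PORT B =====
def company_domain_urls_alt (domains : List String) : List String :=
  let common_paths : List String := ["", "/", "/about", "/about-us", "/contact", "/news", "/company", "/team"]
  let unique := (domains.foldl
    (fun (st : PySem.Set String × List String) domain =>
      let n := PySem.Str.stripChars
        (PySem.Str.replace (PySem.Str.replace (PySem.Str.lower (PySem.Str.strip domain)) "https://" "") "http://" "") "/"
      if n ≠ "" ∧ ¬ (PySem.Set.contains st.1 n = true) then (PySem.Set.add st.1 n, st.2 ++ [n])
      else st)
    (PySem.Set.empty, [])).2
  unique.flatMap (fun n => common_paths.map (fun p => "https://" ++ n ++ p))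

-- ===== PRECONDITION & SPEC =====
-- standalone copies (Pre_ may not reach the ports) of the normalization and the fixed path list
def pvNorm (d : String) : String :=
  PySem.Str.stripChars
    (PySem.Str.replace (PySem.Str.replace (PySem.Str.lower (PySem.Str.strip d)) "https://" "") "http://" "") "/"
def pvPaths : List String := ["", "/", "/about", "/about-us", "/contact", "/news", "/company", "/team"]

-- Pre_ excludes lists in which two DISTINCT normalized domains generate a common candidate URL
-- (possible only for malformed 'domains' such as 'a' next to 'a/about'): there A's URL-level
-- dedupe drops the collision while B's domain-level dedupe keeps both, and either behaviour is
-- defensible on such non-domain input.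
def Pre_company_domain_urls (domains : List String) : Prop :=
  List.Pairwise (fun d1 d2 => pvNorm d1 ≠ pvNorm d2 →
    ∀ p ∈ pvPaths, ∀ q ∈ pvPaths,
      "https://" ++ pvNorm d1 ++ p ≠ "https://" ++ pvNorm d2 ++ q) domains
instance (domains : List String) : Decidable (Pre_company_domain_urls domains) := by
  unfold Pre_company_domain_urls; infer_instance

def pvWitness_company_domain_urls : List String := ["a.co", "b.io"]

def Spec_company_domain_urls (domains : List String) (out : List String) : Prop :=
  out = company_domain_urls_alt domains
instance (domains : List String) (out : List String) : Decidable (Spec_company_domain_urls domains out) := by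
  unfold Spec_company_domain_urls; infer_instance

-- ===== CLAIM (what is proved, stated in full; the proofs are below) =====
def Claim_equal_company_domain_urls : Prop := ∀ (domains : List String), Dom_company_domain_urls domains → Pre_company_domain_urls domains → Spec_company_domain_urls domains (company_domain_urls domains)

-- ===== LEMMAS AND PROOFS =====

def pvUrl (n p : String) : String := "https://" ++ n ++ p
def pvGen (n : String) : List String := pvPaths.map (pvUrl n)
def pvNs (domains : List String) : List String :=
  (domains.map pvNorm).filter (fun n => n ≠ "")

-- URL-level dedupe as a structural recursion (A's loop)
def pvDedupU (seen : PySem.Set String) : List String → List String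
  | [] => []
  | v :: vs =>
    if v = "" ∨ PySem.Set.contains seen v then pvDedupU seen vs
    else v :: pvDedupU (PySem.Set.add seen v) vs

-- domain-level dedupe over normalized nonempty values (B's loop)
def pvDedupN (seen : PySem.Set String) : List String → List String
  | [] => []
  | n :: ns =>
    if PySem.Set.contains seen n then pvDedupN seen ns
    else n :: pvDedupN (PySem.Set.add seen n) ns

theorem pvUrl_inj_right (n p q : String) (h : pvUrl n p = pvUrl n q) : p = q := by
  have h' := congrArg String.toList h
  simp only [pvUrl, String.toList_append, List.append_cancel_left_eq] at h'
  exact String.toList_inj.mp h' 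

theorem pvUrl_ne_empty (n p : String) : pvUrl n p ≠ "" := by
  intro h
  have h' := congrArg String.toList h
  simp [pvUrl, String.toList_append] at h'

theorem pvGen_nodup (n : String) : (pvGen n).Nodup := by
  refine List.Nodup.map_on ?_ (by decide)
  intro p _ q _ h
  exact pvUrl_inj_right n p q h

theorem pvDedupU_fold (vs : List String) (seen : PySem.Set String) (out : List String) :
    (vs.foldl
      (fun (st : PySem.Set String × List String) value =>
        if value = "" ∨ PySem.Set.contains st.1 value then st
        else (PySem.Set.add st.1 value, st.2 ++ [value]))
      (seen, out)).2 = out ++ pvDedupU seen vs := by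
  induction vs generalizing seen out with
  | nil => simp [pvDedupU]
  | cons v vs ih =>
    simp only [List.foldl_cons]
    by_cases h : v = "" ∨ v ∈ seen
    · rw [show (if v = "" ∨ PySem.Set.contains seen v then (seen, out)
          else (PySem.Set.add seen v, out ++ [v])) = (seen, out) by
        rcases h with h | h <;> simp [h]]
      rw [ih]
      rcases h with h | h <;> simp [pvDedupU, h]
    · rw [not_or] at h
      rw [show (if v = "" ∨ PySem.Set.contains seen v then (seen, out)
          else (PySem.Set.add seen v, out ++ [v])) = (PySem.Set.add seen v, out ++ [v]) by
        simp [h.1, h.2]]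
      rw [ih]
      simp [pvDedupU, h.1, h.2]

theorem pvDedupN_fold (ds : List String) (seen : PySem.Set String) (out : List String) :
    (ds.foldl
      (fun (st : PySem.Set String × List String) domain =>
        let n := pvNorm domain
        if n ≠ "" ∧ ¬ (PySem.Set.contains st.1 n = true) then (PySem.Set.add st.1 n, st.2 ++ [n])
        else st)
      (seen, out)).2 = out ++ pvDedupN seen (pvNs ds) := by
  induction ds generalizing seen out with
  | nil => simp [pvDedupN, pvNs]
  | cons d ds ih =>
    have hns : pvNs (d :: ds) =
        if pvNorm d = "" then pvNs ds else pvNorm d :: pvNs ds := by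
      by_cases h : pvNorm d = "" <;> simp [pvNs, h]
    by_cases h0 : pvNorm d = ""
    · simp only [List.foldl_cons, hns, if_pos h0]
      rw [show (if pvNorm d ≠ "" ∧ ¬ (PySem.Set.contains seen (pvNorm d) = true)
            then (PySem.Set.add seen (pvNorm d), out ++ [pvNorm d]) else (seen, out))
          = (seen, out) by simp [h0]]
      exact ih seen out
    · by_cases h1 : pvNorm d ∈ seen
      · simp only [List.foldl_cons, hns, if_neg h0]
        rw [show (if pvNorm d ≠ "" ∧ ¬ (PySem.Set.contains seen (pvNorm d) = true)
              then (PySem.Set.add seen (pvNorm d), out ++ [pvNorm d]) else (seen, out))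
            = (seen, out) by simp [h1]]
        rw [ih seen out]
        simp [pvDedupN, h1]
      · simp only [List.foldl_cons, hns, if_neg h0]
        rw [show (if pvNorm d ≠ "" ∧ ¬ (PySem.Set.contains seen (pvNorm d) = true)
              then (PySem.Set.add seen (pvNorm d), out ++ [pvNorm d]) else (seen, out))
            = (PySem.Set.add seen (pvNorm d), out ++ [pvNorm d]) by simp [h0, h1]]
        rw [ih]
        simp [pvDedupN, h1]

theorem pvUrlsA_fold (ds : List String) (acc : List String) :
    ds.foldl
      (fun urls domain =>
        let normalized := pvNorm domain
        if normalized = "" then urls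
        else pvPaths.foldl (fun urls path => urls ++ [pvUrl normalized path]) urls)
      acc = acc ++ (pvNs ds).flatMap pvGen := by
  induction ds generalizing acc with
  | nil => simp [pvNs]
  | cons d ds ih =>
    by_cases h : pvNorm d = ""
    · simp only [List.foldl_cons, if_pos h]
      rw [ih]
      simp [pvNs, h]
    · simp only [List.foldl_cons, if_neg h]
      rw [PySem.List.foldl_append_singleton_eq_map, ih]
      have : pvNs (d :: ds) = pvNorm d :: pvNs ds := by simp [pvNs, h]
      simp [this, pvGen]

theorem pvDedupU_skip (g t : List String) (seen : PySem.Set String)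
    (h : ∀ u ∈ g, u ∈ seen) :
    pvDedupU seen (g ++ t) = pvDedupU seen t := by
  induction g with
  | nil => simp
  | cons u g ih =>
    have hu : u ∈ seen := h u (by simp)
    simp only [List.cons_append, pvDedupU]
    rw [if_pos (Or.inr (by simpa using hu))]
    exact ih (fun v hv => h v (by simp [hv]))

theorem pvDedupU_fresh (g t : List String) (seen : PySem.Set String)
    (hnd : g.Nodup) (hne : ∀ u ∈ g, u ≠ "") (hfr : ∀ u ∈ g, u ∉ seen) :
    pvDedupU seen (g ++ t) = g ++ pvDedupU (PySem.Set.update seen g) t := by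
  induction g generalizing seen with
  | nil => simp [PySem.Set.update]
  | cons u g ih =>
    have hu1 : u ≠ "" := hne u (by simp)
    have hu2 : u ∉ seen := hfr u (by simp)
    simp only [List.cons_append, pvDedupU]
    rw [if_neg (by simp [hu1, hu2])]
    have hupd : PySem.Set.update seen (u :: g) = PySem.Set.update (PySem.Set.add seen u) g := rfl
    rw [hupd]
    have := ih (PySem.Set.add seen u) (List.Nodup.of_cons hnd)
      (fun v hv => hne v (by simp [hv]))
      (fun v hv => by
        rw [PySem.Set.mem_add]
        rintro (h1 | h2)
        · exact hfr v (by simp [hv]) h1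
        · exact (List.nodup_cons.mp hnd).1 (h2 ▸ hv))
    simp [this]

theorem pv_main (l : List String) (seenD seenU : PySem.Set String)
    (hne : ∀ n ∈ l, n ≠ "")
    (hl : ∀ a ∈ l, ∀ b ∈ l, a ≠ b → ∀ p ∈ pvPaths, ∀ q ∈ pvPaths, pvUrl a p ≠ pvUrl b q)
    (hls : ∀ a ∈ l, ∀ b ∈ seenD, a ≠ b → ∀ p ∈ pvPaths, ∀ q ∈ pvPaths, pvUrl a p ≠ pvUrl b q)
    (hinv : ∀ u, u ∈ seenU ↔ ∃ d ∈ seenD, u ∈ pvGen d) :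
    pvDedupU seenU (l.flatMap pvGen) = (pvDedupN seenD l).flatMap pvGen := by
  induction l generalizing seenD seenU with
  | nil => simp [pvDedupN, pvDedupU]
  | cons n l ih =>
    have hflat : (n :: l).flatMap pvGen = pvGen n ++ l.flatMap pvGen := by simp
    rw [hflat]
    by_cases hmem : n ∈ seenD
    · rw [pvDedupU_skip _ _ _ (fun u hu => (hinv u).mpr ⟨n, hmem, hu⟩)]
      have : pvDedupN seenD (n :: l) = pvDedupN seenD l := by simp [pvDedupN, hmem]
      rw [this]
      exact ih seenD seenU (fun m hm => hne m (by simp [hm]))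
        (fun a ha b hb => hl a (by simp [ha]) b (by simp [hb]))
        (fun a ha b hb => hls a (by simp [ha]) b hb) hinv
    · have hfr : ∀ u ∈ pvGen n, u ∉ seenU := by
        intro u hu hin
        obtain ⟨d, hd, hud⟩ := (hinv u).mp hin
        obtain ⟨p, hp, hup⟩ := List.mem_map.mp hu
        obtain ⟨q, hq, huq⟩ := List.mem_map.mp hud
        by_cases hdn : d = n
        · exact hmem (hdn ▸ hd)
        · exact hls n (by simp) d hd (fun e => hdn e.symm) p hp q hq (hup.trans huq.symm)
      have hne' : ∀ u ∈ pvGen n, u ≠ "" := by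
        intro u hu
        obtain ⟨p, hp, hup⟩ := List.mem_map.mp hu
        exact hup ▸ pvUrl_ne_empty n p
      rw [pvDedupU_fresh _ _ _ (pvGen_nodup n) hne' hfr]
      have hdn : pvDedupN seenD (n :: l) = n :: pvDedupN (PySem.Set.add seenD n) l := by
        simp [pvDedupN, hmem]
      rw [hdn]
      have hrec := ih (PySem.Set.add seenD n) (PySem.Set.update seenU (pvGen n))
        (fun m hm => hne m (by simp [hm]))
        (fun a ha b hb => hl a (by simp [ha]) b (by simp [hb]))
        (by
          intro a ha b hb hab
          rw [PySem.Set.mem_add] at hb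
          rcases hb with hb | hb
          · exact hls a (by simp [ha]) b hb hab
          · exact hb ▸ hl a (by simp [ha]) n (by simp) (hb ▸ hab))
        (by
          intro u
          rw [PySem.Set.mem_update]
          constructor
          · rintro (h1 | h2)
            · obtain ⟨d, hd, hud⟩ := (hinv u).mp h1
              exact ⟨d, (PySem.Set.mem_add seenD n d).mpr (Or.inl hd), hud⟩
            · exact ⟨n, (PySem.Set.mem_add seenD n n).mpr (Or.inr rfl), h2⟩
          · rintro ⟨d, hd, hud⟩
            rw [PySem.Set.mem_add] at hd
            rcases hd with hd | hd
            · exact Or.inl ((hinv u).mpr ⟨d, hd, hud⟩)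
            · exact Or.inr (hd ▸ hud))
      rw [hrec]
      simp

theorem pv_portA (domains : List String) :
    company_domain_urls domains = pvDedupU PySem.Set.empty ((pvNs domains).flatMap pvGen) := by
  show dedupe_preserve_order (domains.foldl
      (fun urls domain =>
        let normalized := pvNorm domain
        if normalized = "" then urls
        else pvPaths.foldl (fun urls path => urls ++ [pvUrl normalized path]) urls) []) = _
  rw [pvUrlsA_fold]
  show (((pvNs domains).flatMap pvGen).foldl
      (fun (st : PySem.Set String × List String) value =>
        if value = "" ∨ PySem.Set.contains st.1 value then st
        else (PySem.Set.add st.1 value, st.2 ++ [value]))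
      (PySem.Set.empty, [])).2 = _
  rw [pvDedupU_fold]
  simp

theorem pv_portB (domains : List String) :
    company_domain_urls_alt domains = (pvDedupN PySem.Set.empty (pvNs domains)).flatMap pvGen := by
  show ((domains.foldl
      (fun (st : PySem.Set String × List String) domain =>
        let n := pvNorm domain
        if n ≠ "" ∧ ¬ (PySem.Set.contains st.1 n = true) then (PySem.Set.add st.1 n, st.2 ++ [n])
        else st)
      (PySem.Set.empty, [])).2).flatMap (fun n => pvPaths.map (fun p => "https://" ++ n ++ p)) = _
  rw [pvDedupN_fold]
  simp only [List.nil_append]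
  rfl

theorem pvNs_mem (domains : List String) (a : String) (ha : a ∈ pvNs domains) :
    a ≠ "" ∧ ∃ d ∈ domains, pvNorm d = a := by
  simp only [pvNs, List.mem_filter, List.mem_map] at ha
  obtain ⟨⟨d, hd, hda⟩, hne⟩ := ha
  exact ⟨by simpa using hne, d, hd, hda⟩

-- ===== VERDICT (by name: the statement is the Claim_ definition above) =====
theorem company_domain_urls_spec : Claim_equal_company_domain_urls := by
  intro domains _ hpre
  unfold Spec_company_domain_urls
  rw [pv_portA, pv_portB]
  have hsym : Symmetric (fun d1 d2 => pvNorm d1 ≠ pvNorm d2 →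
      ∀ p ∈ pvPaths, ∀ q ∈ pvPaths,
        "https://" ++ pvNorm d1 ++ p ≠ "https://" ++ pvNorm d2 ++ q) := by
    intro d1 d2 h hne p hp q hq
    exact (h hne.symm q hq p hp).symm
  have hpair := List.Pairwise.forall hsym hpre
  apply pv_main
  · intro m hm; exact (pvNs_mem domains m hm).1
  · intro a ha b hb hab p hp q hq
    obtain ⟨-, d1, hd1, h1⟩ := pvNs_mem domains a ha
    obtain ⟨-, d2, hd2, h2⟩ := pvNs_mem domains b hb
    have hd12 : d1 ≠ d2 := fun h => hab (h1 ▸ h2 ▸ h ▸ rfl)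
    have := hpair hd1 hd2 hd12 (by rw [h1, h2]; exact hab) p hp q hq
    simpa [pvUrl, h1, h2] using this
  · intro a _ b hb
    simp [PySem.Set.empty] at hb
  · intro u
    simp [PySem.Set.empty]
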